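-- pv_equiv track=rewrite | github.com/nitroxinteligence/sdr-ia-solarprime | utils/reasoning_metrics.py | _check_progression
-- ===== SOURCE A (Python) =====
-- from typing import Dict, List, Any, Optional
--
-- def _check_progression(sessions: List[Dict[str, Any]]) -> str:
--     """Verifica progressão pelos estágios"""
--     stages = [s["stage"] for s in sessions]
--
--     expected_progression = [
--         "INITIAL_CONTACT",
--         "IDENTIFICATION",
--         "DISCOVERY",
--         "QUALIFICATION",
--         "OBJECTION_HANDLING",
--         "SCHEDULING"
--     ]
--
--     # Verifica se segue a progressão esperada
--     current_idx = 0
--     for stage in stages: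
--         if stage in expected_progression:
--             stage_idx = expected_progression.index(stage)
--             if stage_idx >= current_idx:
--                 current_idx = stage_idx
--             else:
--                 return "irregular"
--
--     return "normal" if current_idx > 0 else "stuck"
-- ===== SOURCE B (Python) =====
-- def _check_progression(sessions):
--     """Verifica progressão pelos estágios"""
--     expected_progression = [
--         "INITIAL_CONTACT",
--         "IDENTIFICATION",
--         "DISCOVERY",
--         "QUALIFICATION",
--         "OBJECTION_HANDLING",
--         "SCHEDULING",
--     ]
--
--     # positions in the expected progression, in visit order
--     indices = [expected_progression.index(s["stage"]) for s in sessions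
--                if s["stage"] in expected_progression]
--
--     if any(a > b for a, b in zip(indices, indices[1:])):
--         return "irregular"
--     return "normal" if indices and indices[-1] > 0 else "stuck"
-- ===== Notes on version B (the rewrite author's own statement) =====
-- stated objective: alternative
-- what changed: Replaces the single-pass running-max scan with early return by building the list of expected-progression indices in one comprehension, then checking adjacent pairs for a decrease and inspecting the last index.
import Mathlib
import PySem

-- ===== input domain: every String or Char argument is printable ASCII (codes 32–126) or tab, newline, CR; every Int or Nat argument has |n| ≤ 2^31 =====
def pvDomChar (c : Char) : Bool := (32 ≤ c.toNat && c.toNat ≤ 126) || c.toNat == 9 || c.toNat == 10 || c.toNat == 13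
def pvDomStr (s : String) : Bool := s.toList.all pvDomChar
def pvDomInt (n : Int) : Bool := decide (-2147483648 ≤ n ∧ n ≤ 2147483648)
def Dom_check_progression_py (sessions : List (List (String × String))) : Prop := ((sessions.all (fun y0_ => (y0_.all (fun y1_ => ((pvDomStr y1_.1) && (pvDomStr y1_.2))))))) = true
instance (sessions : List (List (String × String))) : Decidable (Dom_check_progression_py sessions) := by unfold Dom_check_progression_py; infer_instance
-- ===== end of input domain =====

-- B replaces A's running-max scan (with early return) by building the list of
-- expected-progression indices once, then checking adjacent pairs for a decrease
-- and inspecting the last index; same cost, different decomposition.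

-- ===== PORT A =====
-- shared context: the expected progression and s["stage"] lookup (first match in the
-- association list; Pre_ guarantees the key is present, so the "" default is never
-- used — "" is not in pvExpected, matching Python where a missing key raises KeyError)
def pvExpected : List String :=
  ["INITIAL_CONTACT", "IDENTIFICATION", "DISCOVERY", "QUALIFICATION",
   "OBJECTION_HANDLING", "SCHEDULING"]

def pvStage (s : List (String × String)) : String :=
  ((PySem.Dict.mk s).get? "stage").getD ""

-- A's for-loop with the running maximum current_idx and the early return
def pvLoopA : List String → Nat → String
  | [], cur => if cur > 0 then "normal" else "stuck"
  | stage :: rest, cur =>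
    if stage ∈ pvExpected then
      match PySem.List.index? pvExpected stage with
      | some i => if i ≥ cur then pvLoopA rest i else "irregular"
      | none => "irregular"   -- unreachable: stage ∈ pvExpected
    else pvLoopA rest cur

def check_progression_py (sessions : List (List (String × String))) : String :=
  pvLoopA (sessions.map pvStage) 0

-- ===== PORT B =====
def check_progression_py_alt (sessions : List (List (String × String))) : String :=
  let indices : List Nat := sessions.filterMap (fun s =>
    let st := pvStage s
    if st ∈ pvExpected then PySem.List.index? pvExpected st else none)
  if (indices.zip indices.tail).any (fun p => p.1 > p.2) then "irregular"
  else match indices.getLast? with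
       | some l => if l > 0 then "normal" else "stuck"
       | none => "stuck"

-- ===== PRECONDITION & SPEC =====
-- Pre_ excludes sessions missing the "stage" key, on which A raises KeyError
-- (B raises there too).
def Pre_check_progression_py (sessions : List (List (String × String))) : Prop :=
  ∀ s ∈ sessions, ((PySem.Dict.mk s).get? "stage").isSome = true

instance (sessions : List (List (String × String))) : Decidable (Pre_check_progression_py sessions) := by
  unfold Pre_check_progression_py; infer_instance

def pvWitness_check_progression_py : (List (List (String × String))) :=
  [[("stage", "INITIAL_CONTACT")], [("stage", "DISCOVERY")]]

def Spec_check_progression_py (sessions : List (List (String × String))) (out : String) : Prop := out = check_progression_py_alt sessions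
instance (sessions : List (List (String × String))) (out : String) : Decidable (Spec_check_progression_py sessions out) := by unfold Spec_check_progression_py; infer_instance

-- ===== CLAIM (what is proved, stated in full; the proofs are below) =====
def Claim_equal_check_progression_py : Prop := ∀ (sessions : List (List (String × String))), Dom_check_progression_py sessions → Pre_check_progression_py sessions → Spec_check_progression_py sessions (check_progression_py sessions)

-- ===== LEMMAS AND PROOFS =====

-- the indices a list of stages contributes
def pvIdxs (stages : List String) : List Nat :=
  stages.filterMap (fun st =>
    if st ∈ pvExpected then PySem.List.index? pvExpected st else none)

-- "some adjacent pair of cur :: idxs decreases", in A's recursion shape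
def pvBad (cur : Nat) : List Nat → Bool
  | [] => false
  | i :: rest => if i < cur then true else pvBad i rest

lemma pvIdxs_cons_mem {st : String} {i : Nat} (rest : List String)
    (hmem : st ∈ pvExpected) (hi : PySem.List.index? pvExpected st = some i) :
    pvIdxs (st :: rest) = i :: pvIdxs rest := by
  unfold pvIdxs
  rw [List.filterMap_cons, if_pos hmem, hi]

lemma pvIdxs_cons_not_mem {st : String} (rest : List String) (hmem : st ∉ pvExpected) :
    pvIdxs (st :: rest) = pvIdxs rest := by
  unfold pvIdxs
  rw [List.filterMap_cons, if_neg hmem]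

lemma pvLoopA_eq (stages : List String) : ∀ (cur : Nat),
    pvLoopA stages cur =
      if pvBad cur (pvIdxs stages) then "irregular"
      else if (pvIdxs stages).getLastD cur > 0 then "normal" else "stuck" := by
  induction stages with
  | nil => intro cur; simp [pvLoopA, pvIdxs, pvBad, List.getLastD]
  | cons st rest ih =>
    intro cur
    by_cases hmem : st ∈ pvExpected
    · obtain ⟨i, hi⟩ := Option.isSome_iff_exists.mp
        ((PySem.List.index?_isSome_iff (xs := pvExpected) (v := st)).mpr hmem)
      rw [pvIdxs_cons_mem rest hmem hi,
        show pvLoopA (st :: rest) cur =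
          (if st ∈ pvExpected then
            match PySem.List.index? pvExpected st with
            | some i => if i ≥ cur then pvLoopA rest i else "irregular"
            | none => "irregular"
          else pvLoopA rest cur) from rfl,
        if_pos hmem, hi]
      by_cases hge : i ≥ cur
      · have hlt : ¬ i < cur := by omega
        rw [show pvBad cur (i :: pvIdxs rest) = (if i < cur then true else pvBad i (pvIdxs rest)) from rfl,
          if_neg hlt, List.getLastD_cons]
        simp only [hge, if_pos]
        exact ih i
      · have hlt : i < cur := by omega
        rw [show pvBad cur (i :: pvIdxs rest) = (if i < cur then true else pvBad i (pvIdxs rest)) from rfl,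
          if_pos hlt]
        simp [hge]
    · rw [pvIdxs_cons_not_mem rest hmem,
        show pvLoopA (st :: rest) cur =
          (if st ∈ pvExpected then
            match PySem.List.index? pvExpected st with
            | some i => if i ≥ cur then pvLoopA rest i else "irregular"
            | none => "irregular"
          else pvLoopA rest cur) from rfl,
        if_neg hmem]
      exact ih cur

lemma pvBad_zip (idxs : List Nat) : ∀ (cur : Nat),
    pvBad cur idxs =
      (decide (idxs.headD cur < cur) || (idxs.zip idxs.tail).any (fun p => p.1 > p.2)) := by
  induction idxs with
  | nil => intro cur; simp [pvBad]
  | cons i rest ih =>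
    intro cur
    cases rest with
    | nil => simp [pvBad]
    | cons j r =>
      rw [show pvBad cur (i :: j :: r) = (if i < cur then true else pvBad i (j :: r)) from rfl,
        ih i]
      by_cases h : i < cur <;>
        simp [h, List.zip_cons_cons, gt_iff_lt]

-- getLast? of a nonempty list, through the getLastD recursion used above
lemma pvGetLast?_cons : ∀ (r : List Nat) (i d : Nat),
    (i :: r).getLast? = some ((i :: r).getLastD d) := by
  intro r
  induction r with
  | nil => intro i d; simp [List.getLastD]
  | cons j r ih =>
    intro i d
    rw [List.getLast?_cons_cons, List.getLastD_cons, ih j i]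

-- ===== VERDICT (by name: the statement is the Claim_ definition above) =====
theorem check_progression_py_spec : Claim_equal_check_progression_py := by
  intro sessions _ _
  unfold Spec_check_progression_py check_progression_py check_progression_py_alt
  rw [pvLoopA_eq]
  have hidx : pvIdxs (sessions.map pvStage) =
      sessions.filterMap (fun s =>
        if pvStage s ∈ pvExpected then PySem.List.index? pvExpected (pvStage s) else none) := by
    simp [pvIdxs, List.filterMap_map, Function.comp]
  rw [hidx, pvBad_zip]
  cases hI : sessions.filterMap (fun s =>
      if pvStage s ∈ pvExpected then PySem.List.index? pvExpected (pvStage s) else none) with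
  | nil => simp [List.getLastD]
  | cons i r =>
    simp only [List.headD, Nat.not_lt_zero, decide_false, Bool.false_or, List.tail_cons]
    by_cases hb : (((i :: r).zip r).any fun p => p.1 > p.2) = true
    · simp [hb]
    · simp only [hb, if_false, Bool.false_eq_true, pvGetLast?_cons r i 0]
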